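-- pv_equiv track=rewrite | github.com/sora-ryu/LeetCode | compare-strings-by-frequency-of-the-smallest-character/compare-strings-by-frequency-of-the-smallest-character.py | numSmallerByFrequency
-- ===== SOURCE A (Python) =====
-- from typing import List
--
-- def numSmallerByFrequency(queries: List[str], words: List[str]) -> List[int]:
--
--     answer = [0 for i in range(len(queries))]
--     queries_freq = [0 for i in range(len(queries))]
--     words_freq = [0 for i in range(len(words))]
--
--     def f(string):    # count the frequency of the lexicographically smallest character
--         smallest = sorted(string)[0]     # sorted => sort in alphabet
--         count = 0
--
--         for string in sorted(string):
--             if string == smallest: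
--                 count += 1
--
--         return count
--
--
--     for i, query in enumerate(queries):
--         queries_freq[i] = f(query)
--
--     for j, word in enumerate(words):
--         words_freq[j] = f(word)
--
--     for k, num1 in enumerate(queries_freq):
--         for num2 in words_freq:
--             if num1 < num2:
--                 answer[k] += 1
--
--     return answer
-- ===== SOURCE B (Python) =====
-- from typing import List
--
-- def numSmallerByFrequency(queries: List[str], words: List[str]) -> List[int]:
--     # f(s) = frequency of the smallest character, computed directly
--     def f(s):
--         return s.count(min(s))
--
--     wf = sorted(f(w) for w in words)   # sort word frequencies once
--     n = len(wf)
--     res = []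
--     for q in queries:
--         x = f(q)
--         # binary search: first index with wf[idx] > x (bisect_right by hand)
--         lo, hi = 0, n
--         while lo < hi:
--             mid = (lo + hi) // 2
--             if wf[mid] <= x:
--                 lo = mid + 1
--             else:
--                 hi = mid
--         res.append(n - lo)
--     return res
-- ===== Notes on version B (the rewrite author's own statement) =====
-- stated objective: faster
-- what changed: B computes each frequency directly via min/count, sorts the word frequencies once and answers each query with a binary search, replacing A's per-string character sort plus nested query-by-word counting scan.
-- outside the precondition, e.g. on numSmallerByFrequency([''], ['ab']): A raises IndexError, B raises ValueError
import Mathlib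
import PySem

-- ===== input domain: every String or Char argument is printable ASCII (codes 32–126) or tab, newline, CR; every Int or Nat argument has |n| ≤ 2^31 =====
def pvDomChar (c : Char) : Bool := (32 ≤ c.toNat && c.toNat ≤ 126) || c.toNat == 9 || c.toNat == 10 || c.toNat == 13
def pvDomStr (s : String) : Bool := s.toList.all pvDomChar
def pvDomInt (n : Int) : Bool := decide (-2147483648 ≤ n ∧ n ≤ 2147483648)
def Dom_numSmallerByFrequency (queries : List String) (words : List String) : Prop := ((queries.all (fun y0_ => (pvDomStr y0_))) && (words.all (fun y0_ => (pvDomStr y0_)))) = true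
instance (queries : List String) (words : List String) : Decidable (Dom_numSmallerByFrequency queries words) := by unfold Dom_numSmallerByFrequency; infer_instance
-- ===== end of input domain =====

-- B sorts the word frequencies once and answers each query by a hand-written binary
-- search (O((Q+W) log W) instead of A's O(Q*W) nested scan); objective: faster.
-- Both A and B raise on an empty string (IndexError / ValueError), excluded by Pre_.

-- ===== PORT A =====
-- f: frequency of the smallest character, A's way: sort the characters,
-- take sorted[0] (pyGet?; inside Pre_ the string is nonempty so the default is never used),
-- then count equal characters by a loop over the sorted list.
def pvFA (s : String) : Int :=
  let ss := PySem.List.sorted s.toList (fun c => c) false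
  let smallest := (PySem.List.pyGet? ss 0).getD ' '
  ss.foldl (fun count c => if c == smallest then count + 1 else count) 0

def numSmallerByFrequency (queries : List String) (words : List String) : List Int :=
  let queries_freq := queries.map pvFA        -- for i, query: queries_freq[i] = f(query)
  let words_freq := words.map pvFA            -- for j, word:  words_freq[j]  = f(word)
  -- for k, num1: for num2 in words_freq: if num1 < num2: answer[k] += 1
  queries_freq.map (fun num1 =>
    words_freq.foldl (fun acc num2 => if num1 < num2 then acc + 1 else acc) 0)

-- ===== PORT B =====
-- f: min(s) then s.count(min(s)); count of a single-character pattern = List.count of the char (exact).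
def pvFB (s : String) : Int :=
  let m := (PySem.List.min? s.toList (fun c => c)).getD ' '
  (s.toList.count m : Int)

-- while lo < hi: mid = (lo+hi)//2; wf[mid] <= x → lo = mid+1 else hi = mid.
-- lo, hi are nonnegative, so (lo+hi)//2 is Nat division and wf[mid] (0 ≤ mid < hi ≤ len wf)
-- is List.getD (exact on the indices the loop reaches).
def pvBS (wf : List Int) (x : Int) (lo hi : Nat) : Nat :=
  if lo < hi then
    let mid := (lo + hi) / 2
    if wf.getD mid 0 ≤ x then pvBS wf x (mid + 1) hi else pvBS wf x lo mid
  else lo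
termination_by hi - lo
decreasing_by all_goals omega

def numSmallerByFrequency_alt (queries : List String) (words : List String) : List Int :=
  let wf := PySem.List.sorted (words.map pvFB) (fun x => x) false
  let n := wf.length
  queries.map (fun q => (n : Int) - (pvBS wf (pvFB q) 0 n : Int))

-- ===== PRECONDITION & SPEC =====
-- Pre_ excludes inputs containing an empty string, on which the Python A raises
-- IndexError (sorted('')[0]) — and B raises ValueError (min('')) — so neither returns.
def Pre_numSmallerByFrequency (queries : List String) (words : List String) : Prop :=
  (queries.all (fun s => !s.toList.isEmpty) && words.all (fun s => !s.toList.isEmpty)) = true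
instance (queries : List String) (words : List String) : Decidable (Pre_numSmallerByFrequency queries words) := by unfold Pre_numSmallerByFrequency; infer_instance

def pvWitness_numSmallerByFrequency : List String × List String := (["cbd"], ["zaaaz", "bb"])

def Spec_numSmallerByFrequency (queries : List String) (words : List String) (out : List Int) : Prop := out = numSmallerByFrequency_alt queries words
instance (queries : List String) (words : List String) (out : List Int) : Decidable (Spec_numSmallerByFrequency queries words out) := by unfold Spec_numSmallerByFrequency; infer_instance

-- ===== CLAIM (what is proved, stated in full; the proofs are below) =====
def Claim_equal_numSmallerByFrequency : Prop := ∀ (queries : List String) (words : List String), Dom_numSmallerByFrequency queries words → Pre_numSmallerByFrequency queries words → Spec_numSmallerByFrequency queries words (numSmallerByFrequency queries words)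

-- ===== LEMMAS AND PROOFS =====

-- the two frequency helpers agree on every string
theorem pvFA_eq_pvFB (s : String) : pvFA s = pvFB s := by
  unfold pvFA pvFB
  rcases hs : PySem.List.sorted s.toList (fun c => c) false with _ | ⟨a, t⟩
  · have : s.toList = [] := (PySem.List.sorted_eq_nil_iff _ _ _).mp hs
    simp [this, PySem.List.min?, PySem.List.pyGet?]
  · -- head of the sorted list = the minimum
    have hperm := PySem.List.sorted_perm s.toList (fun c => c) false
    rw [hs] at hperm
    have hamem : a ∈ s.toList := hperm.mem_iff.mp (by simp)
    rcases hmin : PySem.List.min? s.toList (fun c => c) with _ | m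
    · exact absurd ((PySem.List.min?_eq_none_iff _ _).mp hmin) (by intro h; simp [h] at hamem)
    · have hmmem : m ∈ s.toList := PySem.List.min?_mem hmin
      have h1 : a ≤ m := PySem.List.key_head_sorted_le _ _ hs m hmmem
      have h2 : m ≤ a := PySem.List.min?_isMin hmin a hamem
      have ham : a = m := le_antisymm h1 h2
      have hget : PySem.List.pyGet? (a :: t) 0 = some a := by
        simp [PySem.List.pyGet?, PySem.List.pyIdx?]
      simp only [hget, Option.getD_some, PySem.List.foldl_beq_add_one]
      subst ham
      rw [hperm.count_eq]
      simp

-- pvBS with a valid bracket returns r with the bracket tightened to [r, r)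
theorem pvBS_bracket (wf : List Int) (x : Int) :
    ∀ lo hi, lo ≤ hi → hi ≤ wf.length →
    (∀ i, i < lo → wf.getD i 0 ≤ x) →
    (∀ i, hi ≤ i → i < wf.length → x < wf.getD i 0) →
    wf.Pairwise (· ≤ ·) →
    (∀ i, i < pvBS wf x lo hi → wf.getD i 0 ≤ x) ∧
    (∀ i, pvBS wf x lo hi ≤ i → i < wf.length → x < wf.getD i 0) ∧
    pvBS wf x lo hi ≤ wf.length := by
  intro lo hi
  induction' hn : hi - lo using Nat.strong_induction_on with n ih generalizing lo hi
  intro hlh hhl hbelow habove hsorted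
  rw [pvBS]
  by_cases h : lo < hi
  · simp only [h, if_true]
    set mid := (lo + hi) / 2 with hmid
    have hm1 : lo ≤ mid := by omega
    have hm2 : mid < hi := by omega
    by_cases hc : wf.getD mid 0 ≤ x
    · simp only [hc, if_true]
      refine ih (hi - (mid + 1)) (by omega) (mid + 1) hi rfl (by omega) hhl ?_ habove hsorted
      intro i hi'
      by_cases hil : i ≤ mid
      · -- wf[i] ≤ wf[mid] ≤ x by sortedness
        have : wf.getD i 0 ≤ wf.getD mid 0 := by
          rcases Nat.lt_or_ge i mid with h' | h'
          · have hml : mid < wf.length := by omega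
            have hil2 : i < wf.length := by omega
            rw [wf.getD_eq_getElem 0 hil2, wf.getD_eq_getElem 0 hml]
            exact List.pairwise_iff_getElem.mp hsorted i mid hil2 hml h'
          · have : i = mid := by omega
            rw [this]
        exact le_trans this hc
      · omega
    · simp only [hc, if_false]
      refine ih (mid - lo) (by omega) lo mid rfl (by omega) (by omega) hbelow ?_ hsorted
      intro i hmi hil
      have h1 : wf.getD mid 0 ≤ wf.getD i 0 := by
        rcases Nat.lt_or_ge mid i with h' | h'
        · have hml : mid < wf.length := by omega
          rw [wf.getD_eq_getElem 0 hil, wf.getD_eq_getElem 0 hml]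
          exact List.pairwise_iff_getElem.mp hsorted mid i hml hil h'
        · have : i = mid := by omega
          rw [this]
      omega
  · simp only [h, if_false]
    have : lo = hi := by omega
    exact ⟨fun i hi' => hbelow i hi', fun i h1 h2 => habove i (by omega) h2, by omega⟩

-- a bracket result counts exactly the elements ≤ x of a list
theorem countP_of_bracket (wf : List Int) (x : Int) (r : Nat)
    (hr : r ≤ wf.length)
    (hb : ∀ i, i < r → wf.getD i 0 ≤ x)
    (ha : ∀ i, r ≤ i → i < wf.length → x < wf.getD i 0) :
    wf.countP (fun y => decide (y ≤ x)) = r := by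
  have hsplit : wf = wf.take r ++ wf.drop r := (List.take_append_drop r wf).symm
  rw [hsplit, List.countP_append]
  have h1 : (wf.take r).countP (fun y => decide (y ≤ x)) = r := by
    rw [List.countP_eq_length.mpr, List.length_take, Nat.min_eq_left hr]
    intro a hmem
    rw [List.mem_iff_getElem] at hmem
    obtain ⟨i, hil, hia⟩ := hmem
    simp only [List.length_take] at hil
    have hir : i < r := by omega
    have : (wf.take r)[i] = wf[i]'(by omega) := List.getElem_take
    rw [this] at hia
    have := hb i hir
    rw [wf.getD_eq_getElem 0 (by omega)] at this
    simp [← hia, this]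
  have h2 : (wf.drop r).countP (fun y => decide (y ≤ x)) = 0 := by
    rw [List.countP_eq_zero]
    intro a hmem
    rw [List.mem_iff_getElem] at hmem
    obtain ⟨i, hil, hia⟩ := hmem
    simp only [List.length_drop] at hil
    have : (wf.drop r)[i] = wf[r + i]'(by omega) := List.getElem_drop
    rw [this] at hia
    have := ha (r + i) (by omega) (by omega)
    rw [wf.getD_eq_getElem 0 (by omega)] at this
    simp [← hia]
    omega
  omega

-- per query: n - pvBS = A's inner counting loop
theorem per_query (l : List Int) (x : Int) :
    l.foldl (fun acc num2 => if x < num2 then acc + 1 else acc) 0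
      = ((PySem.List.sorted l (fun y => y) false).length : Int)
        - (pvBS (PySem.List.sorted l (fun y => y) false) x 0
            (PySem.List.sorted l (fun y => y) false).length : Int) := by
  set s := PySem.List.sorted l (fun y => y) false with hs
  have hperm : s.Perm l := PySem.List.sorted_perm l (fun y => y) false
  have hsorted : s.Pairwise (· ≤ ·) := by
    have := PySem.List.sorted_pairwise l (fun y => y)
    simpa [hs] using this
  obtain ⟨hb, ha, hr⟩ := pvBS_bracket s x 0 s.length (Nat.zero_le _) (le_refl _)
    (by intro i h; omega) (by intro i h1 h2; omega) hsorted
  have hcount : s.countP (fun y => decide (y ≤ x)) = pvBS s x 0 s.length :=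
    countP_of_bracket s x _ hr hb ha
  have hsum : s.countP (fun y => decide (x < y)) + s.countP (fun y => decide (y ≤ x))
      = s.length := by
    have := List.length_eq_countP_add_countP (fun y => decide (x < y)) (l := s)
    have hcongr : s.countP (fun a => decide (¬ decide (x < a) = true)) = s.countP (fun y => decide (y ≤ x)) := by
      apply List.countP_congr
      intro a _
      simp [not_lt]
    omega
  rw [PySem.List.foldl_ite_add_one, ← hperm.countP_eq]
  omega

-- ===== VERDICT (by name: the statement is the Claim_ definition above) =====
theorem numSmallerByFrequency_spec : Claim_equal_numSmallerByFrequency := by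
  intro queries words _ _
  unfold Spec_numSmallerByFrequency numSmallerByFrequency numSmallerByFrequency_alt
  simp only [List.map_map]
  apply List.map_congr_left
  intro q _
  have hmapeq : words.map pvFA = words.map pvFB := List.map_congr_left (fun w _ => pvFA_eq_pvFB w)
  simp only [Function.comp, pvFA_eq_pvFB q, hmapeq]
  exact per_query (words.map pvFB) (pvFB q)
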